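-- pv_equiv track=rewrite | github.com/przemyslaw-pawelczak/inUnity | sceptic/ScEpTIC/tools.py | split_parantheses_groups
-- ===== SOURCE A (Python) =====
-- def split_parantheses_groups(lst, lpar = '[', rpar = ']'):
--     """
--     Splits a list into different parentheses groups.
--     """
--
--     new_list = []
--     sub_list = []
--
--     opened_par = 0
--
--     for i in range(0, len(lst)):
--         element = lst[i]
--         sub_list.append(element)
--
--         if element == lpar:
--             opened_par += 1
--         elif element == rpar:
--             opened_par -= 1
--
--             # on closing parenthesis, if no others are opened, split.
--             if opened_par == 0:
--                 new_list.append(sub_list)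
--                 sub_list = []
--
--     if len(sub_list) > 0:
--         new_list.append(sub_list)
--
--     return new_list
-- ===== SOURCE B (Python) =====
-- def split_parantheses_groups(lst, lpar='[', rpar=']'):
--     # pass 1: cut points = index+1 of each closing parenthesis at depth 0
--     cuts = []
--     depth = 0
--     for i, element in enumerate(lst):
--         if element == lpar:
--             depth += 1
--         elif element == rpar:
--             depth -= 1
--             if depth == 0:
--                 cuts.append(i + 1)
--     # pass 2: slice between consecutive cut points, plus non-empty remainder
--     groups = []
--     start = 0
--     for cut in cuts:
--         groups.append(lst[start:cut])
--         start = cut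
--     tail = lst[start:]
--     if len(tail) > 0:
--         groups.append(tail)
--     return groups
-- ===== Notes on version B (the rewrite author's own statement) =====
-- stated objective: alternative
-- what changed: A accumulates each group element-by-element in a growing sublist during one scan; B first records the cut points (index+1 of every depth-0 closer) and then builds the groups by slicing between consecutive cut points, appending the non-empty remainder.
import Mathlib
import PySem

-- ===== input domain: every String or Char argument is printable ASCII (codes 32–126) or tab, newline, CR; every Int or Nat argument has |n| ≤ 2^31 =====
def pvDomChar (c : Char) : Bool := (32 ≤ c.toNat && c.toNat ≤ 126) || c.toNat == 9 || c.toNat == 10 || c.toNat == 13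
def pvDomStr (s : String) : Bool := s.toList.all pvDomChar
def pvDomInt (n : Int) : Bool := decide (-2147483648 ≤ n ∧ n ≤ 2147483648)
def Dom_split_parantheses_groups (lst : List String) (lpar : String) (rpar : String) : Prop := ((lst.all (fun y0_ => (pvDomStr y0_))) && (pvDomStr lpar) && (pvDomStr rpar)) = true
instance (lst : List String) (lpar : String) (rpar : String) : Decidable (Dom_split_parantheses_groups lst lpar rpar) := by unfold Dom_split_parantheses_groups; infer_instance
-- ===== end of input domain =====

-- B replaces A's sublist accumulator with a two-pass cut-point/slice decomposition (objective: alternative, same O(n) cost).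

-- ===== PORT A =====
-- A's 'for i in range(0, len(lst)): element = lst[i]' visits exactly the elements of lst in order,
-- so it is ported as a foldl over lst with A's loop state (new_list, sub_list, opened_par).
def pvAStep (lpar rpar : String) (st : List (List String) × List String × Int) (element : String) :
    List (List String) × List String × Int :=
  let sub := st.2.1 ++ [element]
  if element = lpar then (st.1, sub, st.2.2 + 1)
  else if element = rpar then
    let opened := st.2.2 - 1
    if opened = 0 then (st.1 ++ [sub], [], opened) else (st.1, sub, opened)
  else (st.1, sub, st.2.2)

def split_parantheses_groups (lst : List String) (lpar : String) (rpar : String) : List (List String) :=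
  let st := lst.foldl (pvAStep lpar rpar) ([], [], 0)
  if st.2.1.length > 0 then st.1 ++ [st.2.1] else st.1

-- ===== PORT B =====
-- pass 1 step: running depth and the list of cut points (index+1 at each depth-0 closer)
def pvBCut (lpar rpar : String) (st : Int × List Int) (p : Int × String) : Int × List Int :=
  if p.2 = lpar then (st.1 + 1, st.2)
  else if p.2 = rpar then
    let d := st.1 - 1
    if d = 0 then (d, st.2 ++ [p.1 + 1]) else (d, st.2)
  else st

-- pass 2 step: slice lst[start:cut], advance start
def pvBGroup (lst : List String) (st : List (List String) × Int) (cut : Int) :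
    List (List String) × Int :=
  (st.1 ++ [PySem.List.slice lst (some st.2) (some cut)], cut)

def split_parantheses_groups_alt (lst : List String) (lpar : String) (rpar : String) : List (List String) :=
  let cuts := ((PySem.List.enumerate lst).foldl (pvBCut lpar rpar) (0, [])).2
  let st := cuts.foldl (pvBGroup lst) ([], 0)
  let tail := PySem.List.slice lst (some st.2) none
  if tail.length > 0 then st.1 ++ [tail] else st.1

-- ===== PRECONDITION & SPEC =====
def Spec_split_parantheses_groups (lst : List String) (lpar : String) (rpar : String) (out : List (List String)) : Prop := out = split_parantheses_groups_alt lst lpar rpar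
instance (lst : List String) (lpar : String) (rpar : String) (out : List (List String)) : Decidable (Spec_split_parantheses_groups lst lpar rpar out) := by unfold Spec_split_parantheses_groups; infer_instance

-- ===== CLAIM (what is proved, stated in full; the proofs are below) =====
def Claim_equal_split_parantheses_groups : Prop := ∀ (lst : List String) (lpar : String) (rpar : String), Dom_split_parantheses_groups lst lpar rpar → Spec_split_parantheses_groups lst lpar rpar (split_parantheses_groups lst lpar rpar)

-- ===== LEMMAS AND PROOFS =====

-- Relative cut positions (1-based element counts) of the top-level closers, as a recursive spec.
def pvCuts (lpar rpar : String) : Int → List String → List Nat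
  | _, [] => []
  | d, x :: xs =>
    if x = lpar then (pvCuts lpar rpar (d + 1) xs).map (· + 1)
    else if x = rpar then
      if d - 1 = 0 then 1 :: (pvCuts lpar rpar (d - 1) xs).map (· + 1)
      else (pvCuts lpar rpar (d - 1) xs).map (· + 1)
    else (pvCuts lpar rpar d xs).map (· + 1)

-- Final depth after scanning, as a recursive spec.
def pvDepth (lpar rpar : String) : Int → List String → Int
  | d, [] => d
  | d, x :: xs =>
    if x = lpar then pvDepth lpar rpar (d + 1) xs
    else if x = rpar then pvDepth lpar rpar (d - 1) xs
    else pvDepth lpar rpar d xs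

-- Groups named by a pending prefix, the remaining list and its relative cut positions.
def pvGroups : List String → List String → List Nat → List (List String)
  | sub, lst, [] => if sub ++ lst = [] then [] else [sub ++ lst]
  | sub, lst, c :: cs => (sub ++ lst.take c) :: pvGroups [] (lst.drop c) (cs.map (· - c))
termination_by _ _ cs => cs.length
decreasing_by simp

theorem pvGroups_shift (cs : List Nat) (sub : List String) (x : String) (xs : List String) :
    pvGroups sub (x :: xs) (cs.map (· + 1)) = pvGroups (sub ++ [x]) xs cs := by
  cases cs with
  | nil => simp [pvGroups]
  | cons c cs =>
    simp only [List.map_cons, pvGroups, List.take_succ_cons, List.drop_succ_cons, List.map_map]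
    have hf : ((fun y => y - (c + 1)) ∘ (fun y : Nat => y + 1)) = (fun y => y - c) := by
      funext y; simp only [Function.comp_apply]; omega
    rw [hf]
    simp

theorem pvA_loop (lst : List String) (lpar rpar : String) :
    ∀ (acc : List (List String)) (sub : List String) (d : Int),
    (let st := lst.foldl (pvAStep lpar rpar) (acc, sub, d);
      if st.2.1.length > 0 then st.1 ++ [st.2.1] else st.1)
    = acc ++ pvGroups sub lst (pvCuts lpar rpar d lst) := by
  induction lst with
  | nil =>
    intro acc sub d
    cases sub <;> simp [pvGroups, pvCuts]
  | cons x xs ih =>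
    intro acc sub d
    simp only [List.foldl_cons, pvCuts]
    by_cases hl : x = lpar
    · simp only [pvAStep, hl, if_true]
      rw [pvGroups_shift]
      exact ih acc (sub ++ [lpar]) (d + 1)
    · by_cases hr : x = rpar
      · subst hr
        by_cases hd : d - 1 = 0
        · simp only [pvAStep, hl, hd, if_true, if_false]
          rw [ih (acc ++ [sub ++ [x]]) [] 0]
          simp only [pvGroups, List.take_succ_cons, List.take_zero, List.drop_succ_cons,
            List.drop_zero, List.map_map]
          have hf : ((fun y => y - 1) ∘ (fun y : Nat => y + 1)) = id := by
            funext y; simp only [Function.comp_apply, id]; omega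
          rw [hf, List.map_id]
          simp
        · simp only [pvAStep, hl, hd, if_true, if_false]
          rw [pvGroups_shift]
          exact ih acc (sub ++ [x]) (d - 1)
      · simp only [pvAStep, hl, hr, if_false]
        rw [pvGroups_shift]
        exact ih acc (sub ++ [x]) d

theorem pvB_cuts (lst : List String) (lpar rpar : String) :
    ∀ (d : Int) (cs : List Int) (s : Nat),
    (PySem.List.enumerate lst (s : Int)).foldl (pvBCut lpar rpar) (d, cs)
    = (pvDepth lpar rpar d lst, cs ++ (pvCuts lpar rpar d lst).map (fun c => ((s + c : Nat) : Int))) := by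
  induction lst with
  | nil => intro d cs s; simp [PySem.List.enumerate_nil, pvCuts, pvDepth]
  | cons x xs ih =>
    intro d cs s
    rw [PySem.List.enumerate_cons]
    simp only [List.foldl_cons, pvCuts, pvDepth]
    have hcast : (s : Int) + 1 = ((s + 1 : Nat) : Int) := by push_cast; ring
    have hmap : ∀ (t : List Nat), (t.map (· + 1)).map (fun c => ((s + c : Nat) : Int))
        = t.map (fun c => ((s + 1 + c : Nat) : Int)) := by
      intro t
      rw [List.map_map]
      apply List.map_congr_left
      intro y _
      simp only [Function.comp_apply]
      push_cast; ring
    by_cases hl : x = lpar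
    · simp only [pvBCut, hl, if_true]
      rw [hcast, ih (d + 1) cs (s + 1), hmap]
    · by_cases hr : x = rpar
      · subst hr
        by_cases hd : d - 1 = 0
        · simp only [pvBCut, hl, hd, if_true, if_false]
          rw [hcast, ih 0 (cs ++ [((s + 1 : Nat) : Int)]) (s + 1)]
          simp only [List.map_cons, hmap, List.append_assoc, List.singleton_append]
        · simp only [pvBCut, hl, hd, if_true, if_false]
          rw [hcast, ih (d - 1) cs (s + 1), hmap]
      · simp only [pvBCut, hl, hr, if_false]
        rw [hcast, ih d cs (s + 1), hmap]

theorem pvCuts_pairwise (lst : List String) (lpar rpar : String) :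
    ∀ d : Int, (pvCuts lpar rpar d lst).Pairwise (· ≤ ·) := by
  induction lst with
  | nil => intro d; simp [pvCuts]
  | cons x xs ih =>
    intro d
    simp only [pvCuts]
    split_ifs with hl hr hd
    · exact (List.pairwise_map.mpr ((ih (d + 1)).imp (by omega)))
    · refine List.Pairwise.cons ?_ (List.pairwise_map.mpr ((ih (d - 1)).imp (by omega)))
      intro y hy
      simp only [List.mem_map] at hy
      omega
    · exact (List.pairwise_map.mpr ((ih (d - 1)).imp (by omega)))
    · exact (List.pairwise_map.mpr ((ih d).imp (by omega)))

theorem pvB_groups_aux (lst : List String) :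
    ∀ (n : Nat) (cs : List Nat), cs.length ≤ n → ∀ (a : Nat) (gs : List (List String)),
    cs.Pairwise (· ≤ ·) →
    (let st := (cs.map (fun c => ((a + c : Nat) : Int))).foldl (pvBGroup lst) (gs, (a : Int));
      let tail := PySem.List.slice lst (some st.2) none;
      if tail.length > 0 then st.1 ++ [tail] else st.1)
    = gs ++ pvGroups [] (lst.drop a) cs := by
  intro n
  induction n with
  | zero =>
    intro cs hlen a gs _
    rw [List.eq_nil_of_length_eq_zero (Nat.le_zero.mp hlen)]
    simp only [List.map_nil, List.foldl_nil, PySem.List.slice_from_natCast, pvGroups]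
    cases lst.drop a <;> simp
  | succ n ih =>
    intro cs hlen a gs hpw
    cases cs with
    | nil =>
      simp only [List.map_nil, List.foldl_nil, PySem.List.slice_from_natCast, pvGroups]
      cases lst.drop a <;> simp
    | cons c cs =>
      have hc : ∀ y ∈ cs, c ≤ y := fun y hy => (List.pairwise_cons.mp hpw).1 y hy
      simp only [List.map_cons, List.foldl_cons, pvBGroup, PySem.List.slice_natCast,
        Nat.add_sub_cancel_left]
      have hmap : cs.map (fun y => ((a + y : Nat) : Int))
          = (cs.map (· - c)).map (fun y => (((a + c) + y : Nat) : Int)) := by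
        rw [List.map_map]
        apply List.map_congr_left
        intro y hy
        have := hc y hy
        simp only [Function.comp_apply]
        congr 1
        omega
      rw [hmap]
      have hpw2 : (cs.map (· - c)).Pairwise (· ≤ ·) :=
        List.Pairwise.map _ (fun _ _ h => Nat.sub_le_sub_right h c) (List.pairwise_cons.mp hpw).2
      have hlen2 : (cs.map (· - c)).length ≤ n := by
        simp only [List.length_map]
        simpa using Nat.le_of_succ_le_succ hlen
      have hih := ih (cs.map (· - c)) hlen2 (a + c) (gs ++ [(lst.drop a).take c]) hpw2
      refine Eq.trans hih ?_
      simp only [pvGroups, List.nil_append, List.append_assoc, List.singleton_append]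
      have hdd : lst.drop (a + c) = (lst.drop a).drop c := by
        rw [List.drop_drop, Nat.add_comm]
      rw [hdd]

theorem pvB_groups (lst : List String) (cs : List Nat) (a : Nat) (gs : List (List String))
    (hpw : cs.Pairwise (· ≤ ·)) :
    (let st := (cs.map (fun c => ((a + c : Nat) : Int))).foldl (pvBGroup lst) (gs, (a : Int));
      let tail := PySem.List.slice lst (some st.2) none;
      if tail.length > 0 then st.1 ++ [tail] else st.1)
    = gs ++ pvGroups [] (lst.drop a) cs :=
  pvB_groups_aux lst cs.length cs le_rfl a gs hpw

-- ===== VERDICT (by name: the statement is the Claim_ definition above) =====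
theorem split_parantheses_groups_spec : Claim_equal_split_parantheses_groups := by
  intro lst lpar rpar _
  unfold Spec_split_parantheses_groups
  unfold split_parantheses_groups split_parantheses_groups_alt
  have hA := pvA_loop lst lpar rpar [] [] 0
  simp only [List.nil_append] at hA
  have hB := pvB_cuts lst lpar rpar 0 [] 0
  simp only [Nat.cast_zero, Nat.zero_add, List.nil_append] at hB
  have hG := pvB_groups lst (pvCuts lpar rpar 0 lst) 0 [] (pvCuts_pairwise lst lpar rpar 0)
  simp only [Nat.cast_zero, Nat.zero_add, List.drop_zero, List.nil_append] at hG
  rw [hB]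
  exact hA.trans hG.symm
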